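-- pv_equiv track=rewrite | github.com/kwhittenberger/sentinel | backend/services/duplicate_detection.py | _are_related_types
-- ===== SOURCE A (Python) =====
-- def _are_related_types(type1: str, type2: str) -> bool:
--     """Check if two incident types are related/similar.
--
--     Uses hand-curated synonym groups. Types within the same group are considered
--     "related" and receive partial credit (0.5 match) in entity matching.
--     Both inputs must already be lowercased with underscores replaced by spaces.
--
--     Note: This is an exact membership check, not fuzzy. A type not in any group
--     will never match even if semantically close.
--     """
--     related_groups = [
--         {'homicide', 'murder', 'manslaughter', 'killing'},
--         {'assault', 'battery', 'attack', 'physical force'},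
--         {'sexual assault', 'rape', 'sexual abuse'},
--         {'dui', 'dui fatality', 'drunk driving', 'intoxicated driving'},
--         {'shooting', 'gunfire', 'firearm'},
--         {'robbery', 'theft', 'burglary'},
--         {'death in custody', 'custody death', 'detention death'},
--     ]
--     for group in related_groups:
--         if type1 in group and type2 in group:
--             return True
--     return False
-- ===== SOURCE B (Python) =====
-- # B: precomputed flat type->group-index dict; two O(1) lookups instead of a per-call scan over the groups.
-- _TYPE_TO_GROUP = {
--     'homicide': 0, 'murder': 0, 'manslaughter': 0, 'killing': 0,
--     'assault': 1, 'battery': 1, 'attack': 1, 'physical force': 1,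
--     'sexual assault': 2, 'rape': 2, 'sexual abuse': 2,
--     'dui': 3, 'dui fatality': 3, 'drunk driving': 3, 'intoxicated driving': 3,
--     'shooting': 4, 'gunfire': 4, 'firearm': 4,
--     'robbery': 5, 'theft': 5, 'burglary': 5,
--     'death in custody': 6, 'custody death': 6, 'detention death': 6,
-- }
--
-- def _are_related_types(type1: str, type2: str) -> bool:
--     g1 = _TYPE_TO_GROUP.get(type1)
--     return g1 is not None and g1 == _TYPE_TO_GROUP.get(type2)
-- ===== Notes on version B (the rewrite author's own statement) =====
-- stated objective: faster
-- what changed: Replaces the per-call loop over seven synonym sets with a precomputed flat dict mapping each type to its group index, so each call is two hash lookups and an equality test (guarded against both being None).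
import Mathlib
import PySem

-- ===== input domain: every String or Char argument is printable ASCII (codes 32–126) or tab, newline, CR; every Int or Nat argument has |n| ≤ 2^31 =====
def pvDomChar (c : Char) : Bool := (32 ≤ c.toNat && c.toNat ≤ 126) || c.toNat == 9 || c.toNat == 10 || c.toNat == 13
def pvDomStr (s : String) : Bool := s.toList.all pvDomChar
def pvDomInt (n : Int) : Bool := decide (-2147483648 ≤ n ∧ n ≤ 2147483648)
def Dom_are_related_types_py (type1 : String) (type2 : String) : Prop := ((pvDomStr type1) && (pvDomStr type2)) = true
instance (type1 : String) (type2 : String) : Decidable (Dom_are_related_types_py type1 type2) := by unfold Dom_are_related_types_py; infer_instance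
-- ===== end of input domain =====

-- B replaces A's per-call loop over the seven synonym sets by a precomputed flat type→group-index dict and two lookups (faster by a constant factor).

-- ===== PORT A =====
def relatedGroups : List (PySem.Set String) :=
  [ PySem.Set.ofList ["homicide", "murder", "manslaughter", "killing"],
    PySem.Set.ofList ["assault", "battery", "attack", "physical force"],
    PySem.Set.ofList ["sexual assault", "rape", "sexual abuse"],
    PySem.Set.ofList ["dui", "dui fatality", "drunk driving", "intoxicated driving"],
    PySem.Set.ofList ["shooting", "gunfire", "firearm"],
    PySem.Set.ofList ["robbery", "theft", "burglary"],
    PySem.Set.ofList ["death in custody", "custody death", "detention death"] ]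

-- the 'for group in related_groups: if …: return True' loop, with early return
def relatedLoop (type1 : String) (type2 : String) : List (PySem.Set String) → Bool
  | [] => false
  | g :: rest =>
      if PySem.Set.contains g type1 && PySem.Set.contains g type2 then true
      else relatedLoop type1 type2 rest

def are_related_types_py (type1 : String) (type2 : String) : Bool :=
  relatedLoop type1 type2 relatedGroups

-- ===== PORT B =====
def typeToGroup : PySem.Dict String Int :=
  PySem.Dict.ofList
    [("homicide", 0), ("murder", 0), ("manslaughter", 0), ("killing", 0),
     ("assault", 1), ("battery", 1), ("attack", 1), ("physical force", 1),
     ("sexual assault", 2), ("rape", 2), ("sexual abuse", 2),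
     ("dui", 3), ("dui fatality", 3), ("drunk driving", 3), ("intoxicated driving", 3),
     ("shooting", 4), ("gunfire", 4), ("firearm", 4),
     ("robbery", 5), ("theft", 5), ("burglary", 5),
     ("death in custody", 6), ("custody death", 6), ("detention death", 6)]

def are_related_types_py_alt (type1 : String) (type2 : String) : Bool :=
  let g1 := PySem.Dict.get? typeToGroup type1
  g1.isSome && (g1 == PySem.Dict.get? typeToGroup type2)

-- ===== PRECONDITION & SPEC =====
def Spec_are_related_types_py (type1 : String) (type2 : String) (out : Bool) : Prop := out = are_related_types_py_alt type1 type2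
instance (type1 : String) (type2 : String) (out : Bool) : Decidable (Spec_are_related_types_py type1 type2 out) := by unfold Spec_are_related_types_py; infer_instance

-- ===== CLAIM (what is proved, stated in full; the proofs are below) =====
def Claim_equal_are_related_types_py : Prop := ∀ (type1 : String) (type2 : String), Dom_are_related_types_py type1 type2 → Spec_are_related_types_py type1 type2 (are_related_types_py type1 type2)

-- ===== LEMMAS AND PROOFS =====

-- all type strings appearing in any group / in the dict
def allTypes : List String :=
  ["homicide", "murder", "manslaughter", "killing", "assault", "battery", "attack",
   "physical force", "sexual assault", "rape", "sexual abuse", "dui", "dui fatality",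
   "drunk driving", "intoxicated driving", "shooting", "gunfire", "firearm",
   "robbery", "theft", "burglary", "death in custody", "custody death", "detention death"]

-- a string outside allTypes makes A's loop return False (it is in no group)
theorem loop_false_left (t1 t2 : String) (h : t1 ∉ allTypes) :
    relatedLoop t1 t2 relatedGroups = false := by
  simp only [allTypes, List.mem_cons, List.not_mem_nil, or_false, not_or] at h
  simp [relatedLoop, relatedGroups, PySem.Set.contains, PySem.Set.ofList, PySem.Set.add,
        List.contains_eq_mem, h, eq_comm]

theorem loop_false_right (t1 t2 : String) (h : t2 ∉ allTypes) :
    relatedLoop t1 t2 relatedGroups = false := by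
  simp only [allTypes, List.mem_cons, List.not_mem_nil, or_false, not_or] at h
  simp [relatedLoop, relatedGroups, PySem.Set.contains, PySem.Set.ofList, PySem.Set.add,
        List.contains_eq_mem, h, eq_comm]

-- a string outside allTypes has no dict entry
theorem get?_notMem (t : String) (h : t ∉ allTypes) :
    PySem.Dict.get? typeToGroup t = none := by
  rw [PySem.Dict.get?_eq_none_iff_not_mem_keys]
  have hk : PySem.Dict.keys typeToGroup = allTypes := by decide
  rw [hk]; exact h

theorem main_eq (t1 t2 : String) :
    are_related_types_py t1 t2 = are_related_types_py_alt t1 t2 := by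
  by_cases h1 : t1 ∈ allTypes
  · by_cases h2 : t2 ∈ allTypes
    · simp only [allTypes, List.mem_cons, List.not_mem_nil, or_false] at h1 h2
      rcases h1 with rfl|rfl|rfl|rfl|rfl|rfl|rfl|rfl|rfl|rfl|rfl|rfl|rfl|rfl|rfl|rfl|rfl|rfl|rfl|rfl|rfl|rfl|rfl|rfl <;> rcases h2 with rfl|rfl|rfl|rfl|rfl|rfl|rfl|rfl|rfl|rfl|rfl|rfl|rfl|rfl|rfl|rfl|rfl|rfl|rfl|rfl|rfl|rfl|rfl|rfl <;> decide
    · rw [show are_related_types_py t1 t2 = false from loop_false_right t1 t2 h2]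
      unfold are_related_types_py_alt
      cases PySem.Dict.get? typeToGroup t1 <;>
        simp [get?_notMem t2 h2]
  · rw [show are_related_types_py t1 t2 = false from loop_false_left t1 t2 h1]
    unfold are_related_types_py_alt
    simp [get?_notMem t1 h1]

-- ===== VERDICT (by name: the statement is the Claim_ definition above) =====
theorem are_related_types_py_spec : Claim_equal_are_related_types_py := by
  intro t1 t2 _
  unfold Spec_are_related_types_py
  exact main_eq t1 t2
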